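-- pv_equiv track=rewrite | github.com/aleverrier/qtanner-search | scripts/sync_best_codes_matrices.py | parse_matrix_name
-- ===== SOURCE A (Python) =====
-- from typing import Dict, List, Optional, Tuple
--
-- def parse_matrix_name(name: str) -> Optional[Tuple[str, str]]:
--     # Return (code_id, kind) if filename matches known patterns.
--     for suf, kind in [
--         ("__Hx.mtx", "x"), ("__HX.mtx", "x"),
--         ("__Hz.mtx", "z"), ("__HZ.mtx", "z"),
--         ("__X.mtx", "x"),  ("__Z.mtx", "z"),
--         ("_Hx.mtx", "x"),  ("_HX.mtx", "x"),
--         ("_Hz.mtx", "z"),  ("_HZ.mtx", "z"),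
--     ]:
--         if name.endswith(suf):
--             return name[: -len(suf)], kind
--     return None
-- ===== SOURCE B (Python) =====
-- def parse_matrix_name(name: str):
--     # Structural parse: strip ".mtx", classify the tail by direct character tests.
--     if not name.endswith(".mtx"):
--         return None
--     stem = name[:-4]
--     if len(stem) >= 3 and stem[-2] == "H" and stem[-1] in "xXzZ" and stem[-3] == "_":
--         cut = 4 if len(stem) >= 4 and stem[-4] == "_" else 3
--         return stem[:-cut], stem[-1].lower()
--     if len(stem) >= 3 and stem[-1] in "XZ" and stem[-2] == "_" and stem[-3] == "_":
--         return stem[:-3], stem[-1].lower()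
--     return None
-- ===== Notes on version B (the rewrite author's own statement) =====
-- stated objective: alternative
-- what changed: A scans an ordered list of ten suffix patterns with endswith and strips the matched suffix; B strips ".mtx" once and classifies the stem by directly testing its last characters (H-prefixed x/X/z/Z with one or two underscores, or uppercase X/Z with exactly two underscores), computing the underscore cut arithmetically.
import Mathlib
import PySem

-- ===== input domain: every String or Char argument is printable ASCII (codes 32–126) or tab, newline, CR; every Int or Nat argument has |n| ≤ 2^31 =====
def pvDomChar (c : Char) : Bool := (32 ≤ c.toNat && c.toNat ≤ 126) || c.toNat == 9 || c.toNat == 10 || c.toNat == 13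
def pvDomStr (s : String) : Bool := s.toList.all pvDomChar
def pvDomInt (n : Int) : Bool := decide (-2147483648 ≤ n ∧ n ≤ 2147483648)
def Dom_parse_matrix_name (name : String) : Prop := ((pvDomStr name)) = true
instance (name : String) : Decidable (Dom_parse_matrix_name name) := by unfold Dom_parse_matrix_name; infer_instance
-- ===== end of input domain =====

-- B replaces A's ordered ten-suffix endswith scan by stripping ".mtx" once and classifying the stem's trailing characters directly; same return value, similar cost (objective: alternative).


-- ===== PORT A =====
def pmnPatterns : List (String × String) :=
  [("__Hx.mtx", "x"), ("__HX.mtx", "x"),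
   ("__Hz.mtx", "z"), ("__HZ.mtx", "z"),
   ("__X.mtx", "x"),  ("__Z.mtx", "z"),
   ("_Hx.mtx", "x"),  ("_HX.mtx", "x"),
   ("_Hz.mtx", "z"),  ("_HZ.mtx", "z")]

def pmnLoop (name : String) : List (String × String) → Option (String × String)
  | [] => none
  | (suf, kind) :: rest =>
    if PySem.Str.endswith name suf then
      some (PySem.Str.slice name none (some (-(PySem.Str.len suf))), kind)
    else pmnLoop name rest

def parse_matrix_name (name : String) : Option (String × String) :=
  pmnLoop name pmnPatterns

-- ===== PORT B =====
def parse_matrix_name_alt (name : String) : Option (String × String) :=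
  if PySem.Str.endswith name ".mtx" = false then none
  else
    let stem := PySem.Str.slice name none (some (-4))
    let c1 := (PySem.Str.pyGet? stem (-1)).getD ' '
    let c2 := (PySem.Str.pyGet? stem (-2)).getD ' '
    let c3 := (PySem.Str.pyGet? stem (-3)).getD ' '
    if 3 ≤ PySem.Str.len stem ∧ c2 = 'H' ∧ (c1 = 'x' ∨ c1 = 'X' ∨ c1 = 'z' ∨ c1 = 'Z') ∧ c3 = '_' then
      let cut : Int := if 4 ≤ PySem.Str.len stem ∧ (PySem.Str.pyGet? stem (-4)).getD ' ' = '_' then 4 else 3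
      some (PySem.Str.slice stem none (some (-cut)), String.ofList [PySem.Chars.lowerChar c1])
    else if 3 ≤ PySem.Str.len stem ∧ (c1 = 'X' ∨ c1 = 'Z') ∧ c2 = '_' ∧ c3 = '_' then
      some (PySem.Str.slice stem none (some (-3)), String.ofList [PySem.Chars.lowerChar c1])
    else none

-- ===== PRECONDITION & SPEC =====
def Spec_parse_matrix_name (name : String) (out : Option (String × String)) : Prop := out = parse_matrix_name_alt name
instance (name : String) (out : Option (String × String)) : Decidable (Spec_parse_matrix_name name out) := by unfold Spec_parse_matrix_name; infer_instance

-- ===== CLAIM (what is proved, stated in full; the proofs are below) =====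
def Claim_equal_parse_matrix_name : Prop := ∀ (name : String), Dom_parse_matrix_name name → Spec_parse_matrix_name name (parse_matrix_name name)

-- ===== LEMMAS AND PROOFS =====

-- Both ports re-expressed over the REVERSED character list rs = name.toList.reverse;
-- they return the reversed remaining prefix as a list together with the kind.
def pmnSpecA (rs : List Char) : Option (List Char × String) :=
  if ['x','t','m','.','x','H','_','_'] <+: rs then some (rs.drop 8, "x")
  else if ['x','t','m','.','X','H','_','_'] <+: rs then some (rs.drop 8, "x")
  else if ['x','t','m','.','z','H','_','_'] <+: rs then some (rs.drop 8, "z")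
  else if ['x','t','m','.','Z','H','_','_'] <+: rs then some (rs.drop 8, "z")
  else if ['x','t','m','.','X','_','_'] <+: rs then some (rs.drop 7, "x")
  else if ['x','t','m','.','Z','_','_'] <+: rs then some (rs.drop 7, "z")
  else if ['x','t','m','.','x','H','_'] <+: rs then some (rs.drop 7, "x")
  else if ['x','t','m','.','X','H','_'] <+: rs then some (rs.drop 7, "x")
  else if ['x','t','m','.','z','H','_'] <+: rs then some (rs.drop 7, "z")
  else if ['x','t','m','.','Z','H','_'] <+: rs then some (rs.drop 7, "z")
  else none

def pmnSpecB (rs : List Char) : Option (List Char × String) :=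
  if ['x','t','m','.'] <+: rs then
    let t := rs.drop 4
    let c1 := t[0]?.getD ' '
    let c2 := t[1]?.getD ' '
    let c3 := t[2]?.getD ' '
    if 3 ≤ t.length ∧ c2 = 'H' ∧ (c1 = 'x' ∨ c1 = 'X' ∨ c1 = 'z' ∨ c1 = 'Z') ∧ c3 = '_' then
      if 4 ≤ t.length ∧ t[3]?.getD ' ' = '_' then
        some (t.drop 4, String.ofList [PySem.Chars.lowerChar c1])
      else
        some (t.drop 3, String.ofList [PySem.Chars.lowerChar c1])
    else if 3 ≤ t.length ∧ (c1 = 'X' ∨ c1 = 'Z') ∧ c2 = '_' ∧ c3 = '_' then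
      some (t.drop 3, String.ofList [PySem.Chars.lowerChar c1])
    else none
  else none

lemma pmn_ew (name suf : String) (l : List Char) (hl : suf.toList.reverse = l) :
    PySem.Str.endswith name suf = true ↔ l <+: name.toList.reverse := by
  rw [PySem.Str.endswith_eq, PySem.Chars.endswith_iff, ← hl, List.reverse_prefix]

lemma pmn_take_sub_reverse (l : List Char) (k : Nat) :
    (l.take (l.length - k)).reverse = l.reverse.drop k := by
  by_cases h : k ≤ l.length
  · rw [List.reverse_take]; congr 1; omega
  · rw [Nat.sub_eq_zero_of_le (by omega)]
    simp [List.drop_eq_nil_of_le, Nat.le_of_lt (by omega : l.length < k)]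

lemma pmn_slice_neg (name : String) (k : Nat) (hk : 1 < k) :
    PySem.Str.slice name none (some (-(OfNat.ofNat k : Int))) =
      String.ofList ((name.toList.reverse.drop k).reverse) := by
  rw [← String.toList_inj]
  rw [PySem.Str.toList_slice, PySem.Chars.slice_eq_listSlice,
      PySem.List.slice_to_neg_ofNat _ k hk, ← pmn_take_sub_reverse]
  simp

lemma pmn_pyGet_neg (l : List Char) (k : Nat) (hk : 0 < k) :
    PySem.List.pyGet? l (-(OfNat.ofNat k : Int)) = l.reverse[k - 1]? := by
  by_cases h : k ≤ l.length
  · rw [PySem.List.pyGet?_neg_ofNat _ k hk h, List.getElem?_reverse (by omega)]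
    congr 1; omega
  · have hn : PySem.List.pyGet? l (-(OfNat.ofNat k : Int)) = none := by
      rw [PySem.List.pyGet?_eq_none_iff]
      unfold PySem.Raise.InRange
      have hcast : (OfNat.ofNat k : Int) = ((k : Nat) : Int) := rfl
      rw [hcast]
      omega
    rw [hn]
    symm; apply List.getElem?_eq_none; simp; omega

lemma pmn_pyGet_str (s : String) (k : Nat) (hk : 0 < k) :
    PySem.Str.pyGet? s (-(OfNat.ofNat k : Int)) = s.toList.reverse[k - 1]? := by
  rw [PySem.Str.pyGet?_eq, PySem.Chars.pyGet?_eq_listPyGet?, pmn_pyGet_neg _ k hk]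

lemma pmn_hxs : String.ofList [PySem.Chars.lowerChar 'x'] = "x" := by decide

lemma pmn_hXs : String.ofList [PySem.Chars.lowerChar 'X'] = "x" := by decide

lemma pmn_hzs : String.ofList [PySem.Chars.lowerChar 'z'] = "z" := by decide

lemma pmn_hZs : String.ofList [PySem.Chars.lowerChar 'Z'] = "z" := by decide

lemma pmn_a_char (name : String) :
    parse_matrix_name name =
      (pmnSpecA name.toList.reverse).map (fun p => (String.ofList p.1.reverse, p.2)) := by
  unfold parse_matrix_name pmnPatterns pmnSpecA
  simp only [pmnLoop]
  by_cases h1 : ['x','t','m','.','x','H','_','_'] <+: name.toList.reverse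
  · rw [if_pos ((pmn_ew name "__Hx.mtx" _ (by decide)).mpr h1), if_pos h1,
       show PySem.Str.len "__Hx.mtx" = 8 from by decide,
       pmn_slice_neg name 8 (by norm_num)]
    rfl
  rw [if_neg (fun he => h1 ((pmn_ew name "__Hx.mtx" _ (by decide)).mp he)), if_neg h1]
  by_cases h2 : ['x','t','m','.','X','H','_','_'] <+: name.toList.reverse
  · rw [if_pos ((pmn_ew name "__HX.mtx" _ (by decide)).mpr h2), if_pos h2,
       show PySem.Str.len "__HX.mtx" = 8 from by decide,
       pmn_slice_neg name 8 (by norm_num)]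
    rfl
  rw [if_neg (fun he => h2 ((pmn_ew name "__HX.mtx" _ (by decide)).mp he)), if_neg h2]
  by_cases h3 : ['x','t','m','.','z','H','_','_'] <+: name.toList.reverse
  · rw [if_pos ((pmn_ew name "__Hz.mtx" _ (by decide)).mpr h3), if_pos h3,
       show PySem.Str.len "__Hz.mtx" = 8 from by decide,
       pmn_slice_neg name 8 (by norm_num)]
    rfl
  rw [if_neg (fun he => h3 ((pmn_ew name "__Hz.mtx" _ (by decide)).mp he)), if_neg h3]
  by_cases h4 : ['x','t','m','.','Z','H','_','_'] <+: name.toList.reverse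
  · rw [if_pos ((pmn_ew name "__HZ.mtx" _ (by decide)).mpr h4), if_pos h4,
       show PySem.Str.len "__HZ.mtx" = 8 from by decide,
       pmn_slice_neg name 8 (by norm_num)]
    rfl
  rw [if_neg (fun he => h4 ((pmn_ew name "__HZ.mtx" _ (by decide)).mp he)), if_neg h4]
  by_cases h5 : ['x','t','m','.','X','_','_'] <+: name.toList.reverse
  · rw [if_pos ((pmn_ew name "__X.mtx" _ (by decide)).mpr h5), if_pos h5,
       show PySem.Str.len "__X.mtx" = 7 from by decide,
       pmn_slice_neg name 7 (by norm_num)]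
    rfl
  rw [if_neg (fun he => h5 ((pmn_ew name "__X.mtx" _ (by decide)).mp he)), if_neg h5]
  by_cases h6 : ['x','t','m','.','Z','_','_'] <+: name.toList.reverse
  · rw [if_pos ((pmn_ew name "__Z.mtx" _ (by decide)).mpr h6), if_pos h6,
       show PySem.Str.len "__Z.mtx" = 7 from by decide,
       pmn_slice_neg name 7 (by norm_num)]
    rfl
  rw [if_neg (fun he => h6 ((pmn_ew name "__Z.mtx" _ (by decide)).mp he)), if_neg h6]
  by_cases h7 : ['x','t','m','.','x','H','_'] <+: name.toList.reverse
  · rw [if_pos ((pmn_ew name "_Hx.mtx" _ (by decide)).mpr h7), if_pos h7,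
       show PySem.Str.len "_Hx.mtx" = 7 from by decide,
       pmn_slice_neg name 7 (by norm_num)]
    rfl
  rw [if_neg (fun he => h7 ((pmn_ew name "_Hx.mtx" _ (by decide)).mp he)), if_neg h7]
  by_cases h8 : ['x','t','m','.','X','H','_'] <+: name.toList.reverse
  · rw [if_pos ((pmn_ew name "_HX.mtx" _ (by decide)).mpr h8), if_pos h8,
       show PySem.Str.len "_HX.mtx" = 7 from by decide,
       pmn_slice_neg name 7 (by norm_num)]
    rfl
  rw [if_neg (fun he => h8 ((pmn_ew name "_HX.mtx" _ (by decide)).mp he)), if_neg h8]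
  by_cases h9 : ['x','t','m','.','z','H','_'] <+: name.toList.reverse
  · rw [if_pos ((pmn_ew name "_Hz.mtx" _ (by decide)).mpr h9), if_pos h9,
       show PySem.Str.len "_Hz.mtx" = 7 from by decide,
       pmn_slice_neg name 7 (by norm_num)]
    rfl
  rw [if_neg (fun he => h9 ((pmn_ew name "_Hz.mtx" _ (by decide)).mp he)), if_neg h9]
  by_cases h10 : ['x','t','m','.','Z','H','_'] <+: name.toList.reverse
  · rw [if_pos ((pmn_ew name "_HZ.mtx" _ (by decide)).mpr h10), if_pos h10,
       show PySem.Str.len "_HZ.mtx" = 7 from by decide,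
       pmn_slice_neg name 7 (by norm_num)]
    rfl
  rw [if_neg (fun he => h10 ((pmn_ew name "_HZ.mtx" _ (by decide)).mp he)), if_neg h10]
  rfl

lemma pmn_b_char (name : String) :
    parse_matrix_name_alt name =
      (pmnSpecB name.toList.reverse).map (fun p => (String.ofList p.1.reverse, p.2)) := by
  unfold parse_matrix_name_alt pmnSpecB
  by_cases h0 : ['x','t','m','.'] <+: name.toList.reverse
  · have ht : PySem.Str.endswith name ".mtx" = true := (pmn_ew name ".mtx" _ (by decide)).mpr h0
    rw [if_neg (by rw [ht]; simp), if_pos h0]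
    rw [pmn_slice_neg name 4 (by norm_num)]
    simp only [show ((-1 : Int)) = (-(OfNat.ofNat 1 : Int)) from rfl,
               show ((-2 : Int)) = (-(OfNat.ofNat 2 : Int)) from rfl,
               show ((-3 : Int)) = (-(OfNat.ofNat 3 : Int)) from rfl,
               show ((-4 : Int)) = (-(OfNat.ofNat 4 : Int)) from rfl,
               pmn_pyGet_str _ 1 (by norm_num), pmn_pyGet_str _ 2 (by norm_num),
               pmn_pyGet_str _ 3 (by norm_num), pmn_pyGet_str _ 4 (by norm_num),
               String.toList_ofList, List.reverse_reverse, PySem.Str.len_eq, List.length_reverse]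
    norm_num
    split_ifs with hc1 hc2 hc3 <;>
      simp [pmn_slice_neg _ 4 (by norm_num), pmn_slice_neg _ 3 (by norm_num),
            String.toList_ofList, List.reverse_reverse]
  · have ht : PySem.Str.endswith name ".mtx" = false := by
      rcases h : PySem.Str.endswith name ".mtx" with _|_
      · rfl
      · exact absurd ((pmn_ew name ".mtx" _ (by decide)).mp h) h0
    rw [if_pos ht, if_neg h0]
    rfl

lemma pmn_key (rs : List Char) : pmnSpecA rs = pmnSpecB rs := by
  unfold pmnSpecA pmnSpecB
  by_cases h0 : ['x','t','m','.'] <+: rs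
  · obtain ⟨u, rfl⟩ := h0
    simp only [List.cons_prefix_cons, List.cons_append, List.nil_append, true_and,
               List.drop_succ_cons, List.drop_zero, if_true,
               List.nil_prefix]
    rcases u with _ | ⟨e, _ | ⟨f, _ | ⟨g, _ | ⟨h, v⟩⟩⟩⟩
    · simp
    · simp [List.cons_prefix_cons]
    · simp [List.cons_prefix_cons]
    · -- u = [e, f, g] : only the three-character suffixes can fire, with cut 3
      by_cases hg : '_' = g
      · subst hg
        by_cases hf : 'H' = f
        · subst hf
          by_cases he1 : 'x' = e; · subst he1; simp [List.cons_prefix_cons, pmn_hxs]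
          by_cases he2 : 'X' = e; · subst he2; simp [List.cons_prefix_cons, pmn_hXs]
          by_cases he3 : 'z' = e; · subst he3; simp [List.cons_prefix_cons, pmn_hzs]
          by_cases he4 : 'Z' = e; · subst he4; simp [List.cons_prefix_cons, pmn_hZs]
          have he1' : ¬ e = 'x' := fun h => he1 h.symm
          have he2' : ¬ e = 'X' := fun h => he2 h.symm
          have he3' : ¬ e = 'z' := fun h => he3 h.symm
          have he4' : ¬ e = 'Z' := fun h => he4 h.symm
          simp [List.cons_prefix_cons, he1, he2, he3, he4, he1', he2', he3', he4']
        · by_cases hf2 : '_' = f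
          · subst hf2
            by_cases he1 : 'X' = e; · subst he1; simp [List.cons_prefix_cons, pmn_hXs]
            by_cases he2 : 'Z' = e; · subst he2; simp [List.cons_prefix_cons, pmn_hZs]
            have he1' : ¬ e = 'X' := fun h => he1 h.symm
            have he2' : ¬ e = 'Z' := fun h => he2 h.symm
            simp [List.cons_prefix_cons, he1, he2, he1', he2']
          · have hf' : ¬ f = 'H' := fun h => hf h.symm
            have hf2' : ¬ f = '_' := fun h => hf2 h.symm
            simp [List.cons_prefix_cons, hf, hf2, hf', hf2']
      · have hg' : ¬ g = '_' := fun h => hg h.symm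
        simp [List.cons_prefix_cons, hg, hg']
    · -- u = e :: f :: g :: h :: v : the general case
      have h3 : 3 ≤ v.length + 1 + 1 + 1 + 1 := by omega
      have h4 : 4 ≤ v.length + 1 + 1 + 1 + 1 := by omega
      by_cases hg : '_' = g
      · subst hg
        by_cases hf : 'H' = f
        · subst hf
          by_cases hh : '_' = h
          · subst hh
            by_cases he1 : 'x' = e; · subst he1; simp [List.cons_prefix_cons, pmn_hxs, h3, h4]
            by_cases he2 : 'X' = e; · subst he2; simp [List.cons_prefix_cons, pmn_hXs, h3, h4]
            by_cases he3 : 'z' = e; · subst he3; simp [List.cons_prefix_cons, pmn_hzs, h3, h4]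
            by_cases he4 : 'Z' = e; · subst he4; simp [List.cons_prefix_cons, pmn_hZs, h3, h4]
            have he1' : ¬ e = 'x' := fun h => he1 h.symm
            have he2' : ¬ e = 'X' := fun h => he2 h.symm
            have he3' : ¬ e = 'z' := fun h => he3 h.symm
            have he4' : ¬ e = 'Z' := fun h => he4 h.symm
            simp [List.cons_prefix_cons, he1, he2, he3, he4, he1', he2', he3', he4']
          · have hh' : ¬ h = '_' := fun hq => hh (Eq.symm hq)
            by_cases he1 : 'x' = e; · subst he1; simp [List.cons_prefix_cons, pmn_hxs, h3, hh, hh']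
            by_cases he2 : 'X' = e; · subst he2; simp [List.cons_prefix_cons, pmn_hXs, h3, hh, hh']
            by_cases he3 : 'z' = e; · subst he3; simp [List.cons_prefix_cons, pmn_hzs, h3, hh, hh']
            by_cases he4 : 'Z' = e; · subst he4; simp [List.cons_prefix_cons, pmn_hZs, h3, hh, hh']
            have he1' : ¬ e = 'x' := fun h => he1 h.symm
            have he2' : ¬ e = 'X' := fun h => he2 h.symm
            have he3' : ¬ e = 'z' := fun h => he3 h.symm
            have he4' : ¬ e = 'Z' := fun h => he4 h.symm
            simp [List.cons_prefix_cons, he1, he2, he3, he4, he1', he2', he3', he4']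
        · by_cases hf2 : '_' = f
          · subst hf2
            by_cases he1 : 'X' = e; · subst he1; simp [List.cons_prefix_cons, pmn_hXs, h3]
            by_cases he2 : 'Z' = e; · subst he2; simp [List.cons_prefix_cons, pmn_hZs, h3]
            have he1' : ¬ e = 'X' := fun h => he1 h.symm
            have he2' : ¬ e = 'Z' := fun h => he2 h.symm
            simp [List.cons_prefix_cons, he1, he2, he1', he2']
          · have hf' : ¬ f = 'H' := fun h => hf h.symm
            have hf2' : ¬ f = '_' := fun h => hf2 h.symm
            simp [List.cons_prefix_cons, hf, hf2, hf', hf2']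
      · have hg' : ¬ g = '_' := fun h => hg h.symm
        simp [List.cons_prefix_cons, hg, hg']
  · rw [if_neg h0]
    have n1 : ¬ (['x','t','m','.','x','H','_','_'] <+: rs) := fun hp => h0 ((show ['x','t','m','.'] <+: ['x','t','m','.','x','H','_','_'] from by decide).trans hp)
    have n2 : ¬ (['x','t','m','.','X','H','_','_'] <+: rs) := fun hp => h0 ((show ['x','t','m','.'] <+: ['x','t','m','.','X','H','_','_'] from by decide).trans hp)
    have n3 : ¬ (['x','t','m','.','z','H','_','_'] <+: rs) := fun hp => h0 ((show ['x','t','m','.'] <+: ['x','t','m','.','z','H','_','_'] from by decide).trans hp)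
    have n4 : ¬ (['x','t','m','.','Z','H','_','_'] <+: rs) := fun hp => h0 ((show ['x','t','m','.'] <+: ['x','t','m','.','Z','H','_','_'] from by decide).trans hp)
    have n5 : ¬ (['x','t','m','.','X','_','_'] <+: rs) := fun hp => h0 ((show ['x','t','m','.'] <+: ['x','t','m','.','X','_','_'] from by decide).trans hp)
    have n6 : ¬ (['x','t','m','.','Z','_','_'] <+: rs) := fun hp => h0 ((show ['x','t','m','.'] <+: ['x','t','m','.','Z','_','_'] from by decide).trans hp)
    have n7 : ¬ (['x','t','m','.','x','H','_'] <+: rs) := fun hp => h0 ((show ['x','t','m','.'] <+: ['x','t','m','.','x','H','_'] from by decide).trans hp)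
    have n8 : ¬ (['x','t','m','.','X','H','_'] <+: rs) := fun hp => h0 ((show ['x','t','m','.'] <+: ['x','t','m','.','X','H','_'] from by decide).trans hp)
    have n9 : ¬ (['x','t','m','.','z','H','_'] <+: rs) := fun hp => h0 ((show ['x','t','m','.'] <+: ['x','t','m','.','z','H','_'] from by decide).trans hp)
    have n10 : ¬ (['x','t','m','.','Z','H','_'] <+: rs) := fun hp => h0 ((show ['x','t','m','.'] <+: ['x','t','m','.','Z','H','_'] from by decide).trans hp)
    rw [if_neg n1, if_neg n2, if_neg n3, if_neg n4, if_neg n5, if_neg n6, if_neg n7, if_neg n8, if_neg n9, if_neg n10]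

-- ===== VERDICT (by name: the statement is the Claim_ definition above) =====
theorem parse_matrix_name_spec : Claim_equal_parse_matrix_name := by
  intro name _
  unfold Spec_parse_matrix_name
  rw [pmn_a_char, pmn_b_char, pmn_key]
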